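-- pv_equiv track=rewrite | github.com/jonolimagnus/forritun_3 | æfingaverk 1A.py | finna_s
-- ===== SOURCE A (Python) =====
-- def finna_s(strengur):
--     temp=""
--     for stafur in strengur:
--         if stafur =="s" or stafur =="S":
--             temp+=stafur
--         else:
--             temp="$"
--     return temp
-- ===== SOURCE B (Python) =====
-- def finna_s(strengur):
--     body = strengur.rstrip("sS")
--     if body == "":
--         return strengur
--     return "$" + strengur[len(body):]
-- ===== Notes on version B (the rewrite author's own statement) =====
-- stated objective: faster
-- what changed: Replaces the forward scan with reset-on-other-char by a loop-free computation: strip the trailing s/S run with rstrip and return the whole string (empty or all-s/S) or the dollar marker followed by that trailing run.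
import Mathlib
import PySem

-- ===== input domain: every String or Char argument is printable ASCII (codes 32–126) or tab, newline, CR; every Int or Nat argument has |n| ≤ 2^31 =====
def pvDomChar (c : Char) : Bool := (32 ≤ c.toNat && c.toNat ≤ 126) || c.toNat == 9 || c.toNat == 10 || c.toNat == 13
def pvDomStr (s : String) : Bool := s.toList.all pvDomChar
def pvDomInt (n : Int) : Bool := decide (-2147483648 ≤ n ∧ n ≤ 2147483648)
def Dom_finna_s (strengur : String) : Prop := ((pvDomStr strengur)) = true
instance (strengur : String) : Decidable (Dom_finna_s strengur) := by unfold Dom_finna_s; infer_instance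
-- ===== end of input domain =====

-- B replaces A's forward scan (reset on every non-s/S char) by a loop-free rstrip/slice computation; measurably faster (A rebuilds the string by repeated concatenation).

-- ===== PORT A =====
-- A: temp=""; for stafur in strengur: append if 's'/'S' else reset temp to "$".
def finna_s (strengur : String) : String :=
  String.ofList (strengur.toList.foldl
    (fun temp stafur => if stafur = 's' || stafur = 'S' then temp ++ [stafur] else ['$']) [])

-- ===== PORT B =====
-- B: body = strengur.rstrip("sS") (drop the trailing s/S run); "" → strengur; else "$" + strengur[len(body):].
def finna_s_alt (strengur : String) : String :=
  let body := String.ofList ((strengur.toList.reverse.dropWhile (fun c => c = 's' || c = 'S')).reverse)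
  if body = "" then strengur
  else "$" ++ String.ofList (strengur.toList.drop body.length)

-- ===== PRECONDITION & SPEC =====
def Spec_finna_s (strengur : String) (out : String) : Prop := out = finna_s_alt strengur
instance (strengur : String) (out : String) : Decidable (Spec_finna_s strengur out) := by unfold Spec_finna_s; infer_instance

-- ===== CLAIM (what is proved, stated in full; the proofs are below) =====
def Claim_equal_finna_s : Prop := ∀ (strengur : String), Dom_finna_s strengur → Spec_finna_s strengur (finna_s strengur)

-- ===== LEMMAS AND PROOFS =====

-- A's loop, characterised: all-s/S strings pass through; otherwise '$' plus the trailing s/S run.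
theorem finna_s_fold_char (l : List Char) :
    l.foldl (fun temp stafur => if stafur = 's' || stafur = 'S' then temp ++ [stafur] else ['$']) []
      = if (l.reverse.dropWhile (fun c => c = 's' || c = 'S')) = [] then l
        else '$' :: (l.reverse.takeWhile (fun c => c = 's' || c = 'S')).reverse := by
  induction l using List.reverseRecOn with
  | nil => simp
  | append_singleton l c ih =>
      rw [List.foldl_append, List.foldl_cons, List.foldl_nil, ih]
      by_cases hc : (c = 's' || c = 'S') = true
      · simp only [List.reverse_append, List.reverse_singleton, List.singleton_append,
          List.dropWhile_cons, List.takeWhile_cons, hc, if_pos]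
        by_cases hd : (l.reverse.dropWhile (fun c => c = 's' || c = 'S')) = []
        · simp [hd]
        · simp [hd]
      · simp only [List.reverse_append, List.reverse_singleton, List.singleton_append,
          List.dropWhile_cons, List.takeWhile_cons, hc]
        simp

-- l with its trailing p-run stripped, then drop that prefix: the trailing run remains.
theorem drop_rstrip (l : List Char) (p : Char → Bool) :
    l.drop (l.reverse.dropWhile p).reverse.length = (l.reverse.takeWhile p).reverse := by
  have h : l = (l.reverse.dropWhile p).reverse ++ (l.reverse.takeWhile p).reverse := by
    rw [← List.reverse_append, List.takeWhile_append_dropWhile, List.reverse_reverse]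
  calc l.drop (l.reverse.dropWhile p).reverse.length
      = ((l.reverse.dropWhile p).reverse ++ (l.reverse.takeWhile p).reverse).drop
          (l.reverse.dropWhile p).reverse.length := by rw [← h]
    _ = _ := List.drop_left

theorem finna_s_spec_aux (s : String) : finna_s s = finna_s_alt s := by
  unfold finna_s finna_s_alt
  rw [finna_s_fold_char]
  by_cases hd : (s.toList.reverse.dropWhile (fun c => c = 's' || c = 'S')) = []
  · simp [hd]
  · have hne : String.ofList ((s.toList.reverse.dropWhile (fun c => c = 's' || c = 'S')).reverse) ≠ "" := by
      simp [String.ext_iff, hd]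
    rw [if_neg hd]
    simp only [if_neg hne]
    have hlen : (String.ofList ((s.toList.reverse.dropWhile (fun c => c = 's' || c = 'S')).reverse)).length
        = (s.toList.reverse.dropWhile (fun c => c = 's' || c = 'S')).reverse.length := by simp
    rw [hlen, drop_rstrip]
    simp [String.ext_iff]

-- ===== VERDICT (by name: the statement is the Claim_ definition above) =====
theorem finna_s_spec : Claim_equal_finna_s := by
  intro s _
  unfold Spec_finna_s
  exact finna_s_spec_aux s
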